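-- pv_equiv track=rewrite | github.com/miricoen/Python-final-project | classes/SevenEight.py | calculate_earnings
-- ===== SOURCE A (Python) =====
-- def calculate_earnings(teams):
--     total_earnings = 0
--     for team in teams:
--         if team % 8 == 0:
--             total_earnings += 200
--         else:
--             additional_users = team % 8
--             total_earnings += 200 + (additional_users * 50)
--     return total_earnings
-- ===== SOURCE B (Python) =====
-- def calculate_earnings(teams):
--     # Bucket teams by residue mod 8, then combine the 8 buckets.
--     counts = [0] * 8
--     for team in teams:
--         counts[team % 8] += 1
--     return sum(counts[r] * (200 + 50 * r) for r in range(8))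
-- ===== Notes on version B (the rewrite author's own statement) =====
-- stated objective: alternative
-- what changed: Replaces A's branchy per-element accumulation with a two-stage bucket algorithm: build a histogram of residues mod 8, then combine the 8 buckets by a weighted sum count[r]*(200+50*r).
import Mathlib
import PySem

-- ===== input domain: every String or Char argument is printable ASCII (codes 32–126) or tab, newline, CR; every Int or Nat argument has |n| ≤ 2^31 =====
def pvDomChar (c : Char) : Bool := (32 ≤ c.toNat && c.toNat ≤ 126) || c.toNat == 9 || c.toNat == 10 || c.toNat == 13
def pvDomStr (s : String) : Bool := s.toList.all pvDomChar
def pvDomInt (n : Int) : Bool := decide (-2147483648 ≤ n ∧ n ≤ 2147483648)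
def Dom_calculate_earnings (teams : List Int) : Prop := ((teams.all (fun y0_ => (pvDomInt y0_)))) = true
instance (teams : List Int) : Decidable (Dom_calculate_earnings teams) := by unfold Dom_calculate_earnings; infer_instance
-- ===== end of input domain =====

-- B replaces A's branchy per-team accumulation by a two-stage residue-histogram: count teams per (team % 8) bucket, then combine the 8 buckets by a weighted sum (objective: alternative).


-- ===== PORT A =====
-- literal transliteration of A: fold over teams with the if/else accumulation
def calculate_earnings (teams : List Int) : Int :=
  teams.foldl (fun total_earnings team =>
    if PySem.Int.mod team 8 == 0 then
      total_earnings + 200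
    else
      let additional_users := PySem.Int.mod team 8
      total_earnings + (200 + additional_users * 50)) 0

-- ===== PORT B =====
-- B's stage 1: counts[team % 8] += 1 over teams; team % 8 is in [0,8) so .toNat is exact
def pvBuckets (teams : List Int) : List Int :=
  teams.foldl (fun cs team =>
    let i := (PySem.Int.mod team 8).toNat
    cs.set i (cs.getD i 0 + 1)) (List.replicate 8 (0 : Int))

-- literal transliteration of B: histogram, then sum(counts[r]*(200+50*r) for r in range(8))
def calculate_earnings_alt (teams : List Int) : Int :=
  let counts := pvBuckets teams
  (List.range 8).foldl (fun s r => s + counts.getD r 0 * (200 + 50 * (r : Int))) 0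

-- ===== PRECONDITION & SPEC =====
def Spec_calculate_earnings (teams : List Int) (out : Int) : Prop := out = calculate_earnings_alt teams
instance (teams : List Int) (out : Int) : Decidable (Spec_calculate_earnings teams out) := by unfold Spec_calculate_earnings; infer_instance

-- ===== CLAIM (what is proved, stated in full; the proofs are below) =====
def Claim_equal_calculate_earnings : Prop := ∀ (teams : List Int), Dom_calculate_earnings teams → Spec_calculate_earnings teams (calculate_earnings teams)

-- ===== LEMMAS AND PROOFS =====
-- B's stage 2 as a function of any counts list
def pvWsum (cs : List Int) : Int :=
  (List.range 8).foldl (fun s r => s + cs.getD r 0 * (200 + 50 * (r : Int))) 0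

theorem pvMod8_emod (t : Int) : PySem.Int.mod t 8 = t % 8 := by
  show t.fmod 8 = t % 8
  rw [Int.fmod_eq_emod]
  simp

theorem pvMod8_nonneg (t : Int) : 0 ≤ PySem.Int.mod t 8 := by
  rw [pvMod8_emod]; exact Int.emod_nonneg t (by norm_num)

theorem pvMod8_lt (t : Int) : (PySem.Int.mod t 8).toNat < 8 := by
  have h : PySem.Int.mod t 8 < 8 := by
    rw [pvMod8_emod]; exact Int.emod_lt_of_pos t (by norm_num)
  omega

-- A's step function adds 200 + (t % 8) * 50 in both branches
theorem pvStepA_eq : (fun (total_earnings team : Int) =>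
    if PySem.Int.mod team 8 == 0 then
      total_earnings + 200
    else
      let additional_users := PySem.Int.mod team 8
      total_earnings + (200 + additional_users * 50))
    = (fun (acc t : Int) => acc + (200 + PySem.Int.mod t 8 * 50)) := by
  funext acc t
  by_cases h : PySem.Int.mod t 8 = 0
  · simp only [h, beq_self_eq_true, if_true]
    ring
  · simp only [beq_iff_eq, h, if_false]

-- A's value is the sum of per-team payments
theorem pvCalcA_eq_sum (teams : List Int) :
    calculate_earnings teams = (teams.map (fun t => 200 + PySem.Int.mod t 8 * 50)).sum := by
  unfold calculate_earnings
  rw [pvStepA_eq, PySem.List.foldl_add]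
  simp

-- incrementing bucket i adds its weight to the weighted sum
theorem pvWsum_incr (cs : List Int) (hlen : cs.length = 8) (i : Nat) (hi : i < 8) :
    pvWsum (cs.set i (cs.getD i 0 + 1)) = pvWsum cs + (200 + 50 * (i : Int)) := by
  match cs, hlen with
  | [a0,a1,a2,a3,a4,a5,a6,a7], _ =>
    interval_cases i <;> simp [pvWsum, List.range_succ, List.getD] <;> ring

-- invariant: building the histogram from cs and summing = pvWsum cs + sum of payments
theorem pvBuckets_invariant (teams : List Int) (cs : List Int) (hlen : cs.length = 8) :
    pvWsum (teams.foldl (fun cs team =>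
      let i := (PySem.Int.mod team 8).toNat
      cs.set i (cs.getD i 0 + 1)) cs)
    = pvWsum cs + (teams.map (fun t => 200 + PySem.Int.mod t 8 * 50)).sum := by
  induction teams generalizing cs with
  | nil => simp
  | cons t ts ih =>
    simp only [List.foldl_cons, List.map_cons, List.sum_cons]
    rw [ih _ (by simp [hlen]), pvWsum_incr cs hlen _ (pvMod8_lt t)]
    have hcast : ((PySem.Int.mod t 8).toNat : Int) = PySem.Int.mod t 8 :=
      Int.toNat_of_nonneg (pvMod8_nonneg t)
    rw [hcast]
    ring

-- ===== VERDICT (by name: the statement is the Claim_ definition above) =====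
theorem calculate_earnings_spec : Claim_equal_calculate_earnings := by
  intro teams _
  unfold Spec_calculate_earnings calculate_earnings_alt pvBuckets
  have h := pvBuckets_invariant teams (List.replicate 8 0) (by simp)
  have hz : pvWsum (List.replicate 8 0) = 0 := by decide
  rw [hz, zero_add] at h
  rw [show ((List.range 8).foldl (fun s r => s + (List.foldl _ (List.replicate 8 0) teams).getD r 0 * (200 + 50 * (r : Int))) 0 : Int) = pvWsum (teams.foldl (fun cs team => let i := (PySem.Int.mod team 8).toNat; cs.set i (cs.getD i 0 + 1)) (List.replicate 8 0)) from rfl, h]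
  exact (pvCalcA_eq_sum teams)
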